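-- pv_equiv track=rewrite | github.com/thegeek-sys/uni | FP/ESAMS-GH/Esami/2022-2023/Esame-6_solved/program.py | draw_rect
-- ===== SOURCE A (Python) =====
-- def draw_rect(img, color, x, y, xr, yr):
--     for i in range(x, x+xr):
--         img[y][i] = color
--         img[y+yr-1][i] = color
--
--     for i in range(y, y+yr):
--         img[i][x] = color
--         img[i][x+xr-1] = color
--
--     return img
-- ===== SOURCE B (Python) =====
-- def draw_rect(img, color, x, y, xr, yr):
--     # Single scan of the whole rectangle region, writing only border cells
--     # (same in-place mutation of img as the original; returns img).
--     for j in range(y, y+yr):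
--         for i in range(x, x+xr):
--             if i == x or i == x+xr-1 or j == y or j == y+yr-1:
--                 img[j][i] = color
--     return img
-- ===== Notes on version B (the rewrite author's own statement) =====
-- stated objective: alternative
-- what changed: B replaces A's two perimeter-only passes (paint top/bottom rows, then paint left/right columns) by a single nested scan of the whole x..x+xr-1 / y..y+yr-1 region that writes only the cells satisfying the border predicate i==x or i==x+xr-1 or j==y or j==y+yr-1.
-- intended difference: On degenerate rectangles where exactly one of xr, yr is <= 0, A's unconditionally-run second (resp. first) loop still paints two full columns (resp. rows) of the empty rectangle, while B leaves the image unchanged, which is the intended rendering of an empty rectangle. — e.g. on draw_rect([["a", "b"]], ".", 1, 0, 0, 1): A returns [[".", "."]], B returns [["a", "b"]]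
import Mathlib
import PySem

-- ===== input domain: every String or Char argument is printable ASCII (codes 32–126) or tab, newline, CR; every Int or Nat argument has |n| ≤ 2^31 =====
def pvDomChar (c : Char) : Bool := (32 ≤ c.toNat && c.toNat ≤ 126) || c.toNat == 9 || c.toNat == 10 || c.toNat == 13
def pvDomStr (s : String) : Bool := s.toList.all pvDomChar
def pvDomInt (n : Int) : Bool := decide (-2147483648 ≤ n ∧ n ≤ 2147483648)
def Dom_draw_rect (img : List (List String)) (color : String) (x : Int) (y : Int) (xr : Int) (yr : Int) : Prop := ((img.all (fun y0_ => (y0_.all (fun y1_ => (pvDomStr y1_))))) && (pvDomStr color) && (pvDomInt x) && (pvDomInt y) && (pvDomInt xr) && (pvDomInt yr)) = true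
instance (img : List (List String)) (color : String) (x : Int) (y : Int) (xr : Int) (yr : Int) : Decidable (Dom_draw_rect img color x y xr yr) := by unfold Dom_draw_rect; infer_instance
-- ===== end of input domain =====

-- B replaces A's two perimeter-only passes by a single scan of the whole rectangle region that
-- writes only the cells satisfying the border predicate (alternative decomposition, not faster);
-- both versions mutate img's rows in place in Python and return img — the equivalence proved here
-- is about the returned grid.

-- pyAssign2 im r c v models the Python statement im[r][c] = v (negative indices wrap, as in
-- Python); where Python would raise IndexError it leaves im unchanged — such inputs are outside
-- Pre_draw_rect.  Shared by both ports (it is the assignment primitive, not an algorithm).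
def pyAssign2 (im : List (List String)) (r c : Int) (v : String) : List (List String) :=
  match PySem.List.pyIdx? im.length r with
  | none => im
  | some a =>
    let row := im.getD a []
    match PySem.List.pyIdx? row.length c with
    | none => im
    | some b => im.set a (row.set b v)

-- ===== PORT A =====
def draw_rect (img : List (List String)) (color : String) (x : Int) (y : Int) (xr : Int) (yr : Int) : List (List String) :=
  let img1 := (PySem.List.pyRange x (x + xr) 1).foldl
    (fun im i => pyAssign2 (pyAssign2 im y i color) (y + yr - 1) i color) img
  (PySem.List.pyRange y (y + yr) 1).foldl
    (fun im i => pyAssign2 (pyAssign2 im i x color) i (x + xr - 1) color) img1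

-- ===== PORT B =====
def draw_rect_alt (img : List (List String)) (color : String) (x : Int) (y : Int) (xr : Int) (yr : Int) : List (List String) :=
  (PySem.List.pyRange y (y + yr) 1).foldl
    (fun im j =>
      (PySem.List.pyRange x (x + xr) 1).foldl
        (fun im2 i =>
          if i = x ∨ i = x + xr - 1 ∨ j = y ∨ j = y + yr - 1 then pyAssign2 im2 j i color
          else im2) im) img

-- ===== PRECONDITION & SPEC =====
-- Pre_draw_rect = exactly the inputs on which the Python A raises no IndexError: every row index
-- A touches is in range and the two column indices x, x+xr-1 (and, when the first loop runs, the
-- whole column segment, whose in-range-ness is equivalent to that of its endpoints) are in range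
-- of the touched rows.
def Pre_draw_rect (img : List (List String)) (color : String) (x : Int) (y : Int) (xr : Int) (yr : Int) : Prop :=
  (1 ≤ xr →
    PySem.Raise.InRange img.length y ∧ PySem.Raise.InRange img.length (y + yr - 1) ∧
    PySem.Raise.InRange (img.getD ((PySem.List.pyIdx? img.length y).getD 0) []).length x ∧
    PySem.Raise.InRange (img.getD ((PySem.List.pyIdx? img.length y).getD 0) []).length (x + xr - 1) ∧
    PySem.Raise.InRange (img.getD ((PySem.List.pyIdx? img.length (y + yr - 1)).getD 0) []).length x ∧
    PySem.Raise.InRange (img.getD ((PySem.List.pyIdx? img.length (y + yr - 1)).getD 0) []).length (x + xr - 1)) ∧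
  (1 ≤ yr →
    PySem.Raise.InRange img.length y ∧ PySem.Raise.InRange img.length (y + yr - 1) ∧
    -- a physical row p is touched by the second loop iff the logical index p or p - len(img)
    -- lies in [y, y+yr); on every touched row both column indexes must be in range
    ∀ p ∈ List.range img.length,
      ((y ≤ (p : Int) ∧ (p : Int) < y + yr) ∨
       (y ≤ (p : Int) - img.length ∧ (p : Int) - img.length < y + yr)) →
      PySem.Raise.InRange (img.getD p []).length x ∧
      PySem.Raise.InRange (img.getD p []).length (x + xr - 1))
instance (img : List (List String)) (color : String) (x : Int) (y : Int) (xr : Int) (yr : Int) : Decidable (Pre_draw_rect img color x y xr yr) := by unfold Pre_draw_rect; infer_instance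

def pvWitness_draw_rect : List (List String) × String × Int × Int × Int × Int :=
  ([["a", "b"], ["c", "d"]], ".", 0, 0, 2, 2)

-- On degenerate rectangles where exactly one of xr, yr is ≤ 0, A's unconditionally-run second
-- (resp. first) loop still paints two full columns (resp. rows) of the empty rectangle; B leaves
-- the image unchanged, which is the intended rendering of an empty rectangle.
def D_draw_rect (img : List (List String)) (color : String) (x : Int) (y : Int) (xr : Int) (yr : Int) : Prop :=
  (xr ≤ 0 ∧ 1 ≤ yr) ∨ (yr ≤ 0 ∧ 1 ≤ xr)
instance (img : List (List String)) (color : String) (x : Int) (y : Int) (xr : Int) (yr : Int) : Decidable (D_draw_rect img color x y xr yr) := by unfold D_draw_rect; infer_instance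

def Spec_draw_rect (img : List (List String)) (color : String) (x : Int) (y : Int) (xr : Int) (yr : Int) (out : List (List String)) : Prop := ¬ D_draw_rect img color x y xr yr → out = draw_rect_alt img color x y xr yr
instance (img : List (List String)) (color : String) (x : Int) (y : Int) (xr : Int) (yr : Int) (out : List (List String)) : Decidable (Spec_draw_rect img color x y xr yr out) := by unfold Spec_draw_rect; infer_instance

def pvDiffWitness_draw_rect : List (List String) × String × Int × Int × Int × Int :=
  ([["a", "b"]], ".", 1, 0, 0, 1)
def pvDiffWitnessOut_draw_rect : (List (List String)) × (List (List String)) :=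
  ([[".", "."]], [["a", "b"]])

-- ===== CLAIM (what is proved, stated in full; the proofs are below) =====
def Claim_unchanged_draw_rect : Prop := ∀ (img : List (List String)) (color : String) (x : Int) (y : Int) (xr : Int) (yr : Int), Dom_draw_rect img color x y xr yr → Pre_draw_rect img color x y xr yr → Spec_draw_rect img color x y xr yr (draw_rect img color x y xr yr)
def Claim_changed_draw_rect : Prop := Dom_draw_rect (pvDiffWitness_draw_rect.1) (pvDiffWitness_draw_rect.2.1) (pvDiffWitness_draw_rect.2.2.1) (pvDiffWitness_draw_rect.2.2.2.1) (pvDiffWitness_draw_rect.2.2.2.2.1) (pvDiffWitness_draw_rect.2.2.2.2.2) ∧ Pre_draw_rect (pvDiffWitness_draw_rect.1) (pvDiffWitness_draw_rect.2.1) (pvDiffWitness_draw_rect.2.2.1) (pvDiffWitness_draw_rect.2.2.2.1) (pvDiffWitness_draw_rect.2.2.2.2.1) (pvDiffWitness_draw_rect.2.2.2.2.2) ∧ D_draw_rect (pvDiffWitness_draw_rect.1) (pvDiffWitness_draw_rect.2.1) (pvDiffWitness_draw_rect.2.2.1) (pvDiffWitness_draw_rect.2.2.2.1) (pvDiffWitness_draw_rect.2.2.2.2.1)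 (pvDiffWitness_draw_rect.2.2.2.2.2) ∧ draw_rect (pvDiffWitness_draw_rect.1) (pvDiffWitness_draw_rect.2.1) (pvDiffWitness_draw_rect.2.2.1) (pvDiffWitness_draw_rect.2.2.2.1) (pvDiffWitness_draw_rect.2.2.2.2.1) (pvDiffWitness_draw_rect.2.2.2.2.2) = pvDiffWitnessOut_draw_rect.1 ∧ draw_rect_alt (pvDiffWitness_draw_rect.1) (pvDiffWitness_draw_rect.2.1) (pvDiffWitness_draw_rect.2.2.1) (pvDiffWitness_draw_rect.2.2.2.1) (pvDiffWitness_draw_rect.2.2.2.2.1) (pvDiffWitness_draw_rect.2.2.2.2.2) = pvDiffWitnessOut_draw_rect.2 ∧ pvDiffWitnessOut_draw_rect.1 ≠ pvDiffWitnessOut_draw_rect.2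

-- ===== LEMMAS AND PROOFS =====

theorem pyIdx?_lt {n : Nat} {i : Int} {a : Nat} (h : PySem.List.pyIdx? n i = some a) : a < n := by
  unfold PySem.List.pyIdx? at h
  split at h
  · split at h
    · cases h; omega
    · cases h
  · split at h
    · cases h
      rename_i h1 h2
      omega
    · cases h

theorem pyAssign2_none₁ {im : List (List String)} {r : Int} (c : Int) (v : String)
    (ha : PySem.List.pyIdx? im.length r = none) : pyAssign2 im r c v = im := by
  unfold pyAssign2; rw [ha]

theorem pyAssign2_none₂ {im : List (List String)} {r c : Int} {a : Nat} (v : String)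
    (ha : PySem.List.pyIdx? im.length r = some a)
    (hb : PySem.List.pyIdx? (im.getD a []).length c = none) : pyAssign2 im r c v = im := by
  unfold pyAssign2; rw [ha]; simp only []; rw [hb]

theorem pyAssign2_some {im : List (List String)} {r c : Int} {a b : Nat} (v : String)
    (ha : PySem.List.pyIdx? im.length r = some a)
    (hb : PySem.List.pyIdx? (im.getD a []).length c = some b) :
    pyAssign2 im r c v = im.set a ((im.getD a []).set b v) := by
  unfold pyAssign2; rw [ha]; simp only []; rw [hb]

theorem pyAssign2_length (im : List (List String)) (r c : Int) (v : String) :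
    (pyAssign2 im r c v).length = im.length := by
  rcases ha : PySem.List.pyIdx? im.length r with _ | a
  · rw [pyAssign2_none₁ c v ha]
  · rcases hb : PySem.List.pyIdx? (im.getD a []).length c with _ | b
    · rw [pyAssign2_none₂ v ha hb]
    · rw [pyAssign2_some v ha hb, List.length_set]

theorem pyAssign2_rowlen (im : List (List String)) (r c : Int) (v : String) (j : Nat) :
    ((pyAssign2 im r c v).getD j []).length = (im.getD j []).length := by
  rcases ha : PySem.List.pyIdx? im.length r with _ | a
  · rw [pyAssign2_none₁ c v ha]
  · rcases hb : PySem.List.pyIdx? (im.getD a []).length c with _ | b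
    · rw [pyAssign2_none₂ v ha hb]
    · rw [pyAssign2_some v ha hb]
      by_cases hj : a = j
      · subst hj
        have hlt : a < im.length := pyIdx?_lt ha
        simp [List.getD_eq_getElem?_getD, hlt]
      · simp [List.getD_eq_getElem?_getD, hj]

def pvInvalid (im : List (List String)) (r c : Int) : Prop :=
  PySem.List.pyIdx? im.length r = none ∨
  ∃ a, PySem.List.pyIdx? im.length r = some a ∧
    PySem.List.pyIdx? ((im.getD a []).length) c = none

theorem pyAssign2_of_invalid {im : List (List String)} {r c : Int} (v : String)
    (h : pvInvalid im r c) : pyAssign2 im r c v = im := by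
  rcases h with h | ⟨a, ha, hb⟩
  · exact pyAssign2_none₁ c v h
  · exact pyAssign2_none₂ v ha hb

theorem pvInvalid_pres {im : List (List String)} {r c : Int} (r' c' : Int) (v : String)
    (h : pvInvalid im r c) : pvInvalid (pyAssign2 im r' c' v) r c := by
  rcases h with h | ⟨a, ha, hb⟩
  · exact Or.inl (by rw [pyAssign2_length]; exact h)
  · exact Or.inr ⟨a, by rw [pyAssign2_length]; exact ha, by rw [pyAssign2_rowlen]; exact hb⟩

theorem pvValid_extract {im : List (List String)} {r c : Int} (h : ¬ pvInvalid im r c) :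
    ∃ a b, PySem.List.pyIdx? im.length r = some a ∧
      PySem.List.pyIdx? ((im.getD a []).length) c = some b := by
  unfold pvInvalid at h
  rcases ha : PySem.List.pyIdx? im.length r with _ | a
  · exact absurd (Or.inl ha) h
  · rcases hb : PySem.List.pyIdx? ((im.getD a []).length) c with _ | b
    · exact absurd (Or.inr ⟨a, ha, hb⟩) h
    · exact ⟨a, b, rfl, hb⟩

theorem pyAssign2_comm (im : List (List String)) (r c r' c' : Int) (v : String) :
    pyAssign2 (pyAssign2 im r c v) r' c' v = pyAssign2 (pyAssign2 im r' c' v) r c v := by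
  by_cases h1 : pvInvalid im r c
  · rw [pyAssign2_of_invalid v h1, pyAssign2_of_invalid v (pvInvalid_pres r' c' v h1)]
  by_cases h2 : pvInvalid im r' c'
  · rw [pyAssign2_of_invalid v h2, pyAssign2_of_invalid v (pvInvalid_pres r c v h2)]
  obtain ⟨a, b, ha, hb⟩ := pvValid_extract h1
  obtain ⟨a', b', ha', hb'⟩ := pvValid_extract h2
  have hlt : a < im.length := pyIdx?_lt ha
  have hlt' : a' < im.length := pyIdx?_lt ha'
  rw [pyAssign2_some v ha hb, pyAssign2_some v ha' hb']
  -- recompute indices on the updated images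
  have haU : PySem.List.pyIdx? (im.set a ((im.getD a []).set b v)).length r' = some a' := by
    rw [List.length_set]; exact ha'
  have haU' : PySem.List.pyIdx? (im.set a' ((im.getD a' []).set b' v)).length r = some a := by
    rw [List.length_set]; exact ha
  by_cases hne : a = a'
  · subst hne
    have hrowU : (im.set a ((im.getD a []).set b v)).getD a [] = (im.getD a []).set b v := by
      simp [List.getD_eq_getElem?_getD, hlt]
    have hrowU' : (im.set a ((im.getD a []).set b' v)).getD a [] = (im.getD a []).set b' v := by
      simp [List.getD_eq_getElem?_getD, hlt]
    have hbU : PySem.List.pyIdx? ((im.set a ((im.getD a []).set b v)).getD a []).length c' = some b' := by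
      rw [hrowU, List.length_set]; exact hb'
    have hbU' : PySem.List.pyIdx? ((im.set a ((im.getD a []).set b' v)).getD a []).length c = some b := by
      rw [hrowU', List.length_set]; exact hb
    rw [pyAssign2_some v haU hbU, pyAssign2_some v haU' hbU', hrowU, hrowU',
        List.set_set, List.set_set]
    by_cases hbb : b = b'
    · subst hbb; rw [List.set_set]
    · rw [List.set_comm _ _ hbb]
  · have hrowU : (im.set a ((im.getD a []).set b v)).getD a' [] = im.getD a' [] := by
      simp [List.getD_eq_getElem?_getD, hne]
    have hrowU' : (im.set a' ((im.getD a' []).set b' v)).getD a [] = im.getD a [] := by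
      simp [List.getD_eq_getElem?_getD, Ne.symm hne]
    have hbU : PySem.List.pyIdx? ((im.set a ((im.getD a []).set b v)).getD a' []).length c' = some b' := by
      rw [hrowU]; exact hb'
    have hbU' : PySem.List.pyIdx? ((im.set a' ((im.getD a' []).set b' v)).getD a []).length c = some b := by
      rw [hrowU']; exact hb
    rw [pyAssign2_some v haU hbU, pyAssign2_some v haU' hbU', hrowU, hrowU',
        List.set_comm _ _ hne]

theorem pyAssign2_idem (im : List (List String)) (r c : Int) (v : String) :
    pyAssign2 (pyAssign2 im r c v) r c v = pyAssign2 im r c v := by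
  by_cases h1 : pvInvalid im r c
  · rw [pyAssign2_of_invalid v h1, pyAssign2_of_invalid v h1]
  obtain ⟨a, b, ha, hb⟩ := pvValid_extract h1
  have hlt : a < im.length := pyIdx?_lt ha
  rw [pyAssign2_some v ha hb]
  have haU : PySem.List.pyIdx? (im.set a ((im.getD a []).set b v)).length r = some a := by
    rw [List.length_set]; exact ha
  have hrowU : (im.set a ((im.getD a []).set b v)).getD a [] = (im.getD a []).set b v := by
    simp [List.getD_eq_getElem?_getD, hlt]
  have hbU : PySem.List.pyIdx? ((im.set a ((im.getD a []).set b v)).getD a []).length c = some b := by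
    rw [hrowU, List.length_set]; exact hb
  rw [pyAssign2_some v haU hbU, hrowU, List.set_set, List.set_set]

-- the single-cell write as a fold step over (row, column) pairs
def pvW (v : String) (im : List (List String)) (p : Int × Int) : List (List String) :=
  pyAssign2 im p.1 p.2 v

theorem foldl_pvW_absorb (v : String) (l : List (Int × Int)) (init : List (List String))
    (p : Int × Int) (hp : p ∈ l) :
    List.foldl (pvW v) (pvW v init p) l = List.foldl (pvW v) init l := by
  induction l generalizing init with
  | nil => cases hp
  | cons q t ih =>
    rcases List.mem_cons.mp hp with h | h
    · subst h
      simp only [List.foldl_cons]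
      rw [show pvW v (pvW v init p) p = pvW v init p from pyAssign2_idem ..]
    · simp only [List.foldl_cons]
      rw [show pvW v (pvW v init p) q = pvW v (pvW v init q) p from pyAssign2_comm ..]
      exact ih _ h

theorem foldl_pvW_dedup (v : String) (l : List (Int × Int)) (init : List (List String)) :
    List.foldl (pvW v) init l = List.foldl (pvW v) init l.dedup := by
  induction l generalizing init with
  | nil => rfl
  | cons q t ih =>
    by_cases h : q ∈ t
    · rw [List.dedup_cons_of_mem h, List.foldl_cons, foldl_pvW_absorb v t init q h, ih]
    · rw [List.dedup_cons_of_notMem h, List.foldl_cons, List.foldl_cons, ih]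

theorem foldl_pvW_of_mem_iff (v : String) (l₁ l₂ : List (Int × Int)) (init : List (List String))
    (h : ∀ z, z ∈ l₁ ↔ z ∈ l₂) :
    List.foldl (pvW v) init l₁ = List.foldl (pvW v) init l₂ := by
  haveI : RightCommutative (pvW v) := ⟨fun b a a' => pyAssign2_comm ..⟩
  rw [foldl_pvW_dedup, foldl_pvW_dedup v l₂]
  refine List.Perm.foldl_eq ?_ init
  exact (List.perm_ext_iff_of_nodup l₁.nodup_dedup l₂.nodup_dedup).mpr (by
    intro a; simp only [List.mem_dedup]; exact h a)

-- the two write lists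
def pvLA (x y xr yr : Int) : List (Int × Int) :=
  ((PySem.List.pyRange x (x + xr) 1).flatMap fun i => [(y, i), (y + yr - 1, i)]) ++
  ((PySem.List.pyRange y (y + yr) 1).flatMap fun j => [(j, x), (j, x + xr - 1)])

def pvLB (x y xr yr : Int) : List (Int × Int) :=
  (PySem.List.pyRange y (y + yr) 1).flatMap fun j =>
    ((PySem.List.pyRange x (x + xr) 1).filter
      (fun i => decide (i = x ∨ i = x + xr - 1 ∨ j = y ∨ j = y + yr - 1))).map fun i => (j, i)

theorem draw_rect_eq_foldl (img : List (List String)) (color : String) (x y xr yr : Int) :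
    draw_rect img color x y xr yr = List.foldl (pvW color) img (pvLA x y xr yr) := by
  unfold draw_rect pvLA
  rw [List.foldl_append, List.foldl_flatMap, List.foldl_flatMap]
  rfl

theorem draw_rect_alt_eq_foldl (img : List (List String)) (color : String) (x y xr yr : Int) :
    draw_rect_alt img color x y xr yr = List.foldl (pvW color) img (pvLB x y xr yr) := by
  unfold draw_rect_alt pvLB
  rw [List.foldl_flatMap]
  refine List.foldl_ext _ _ img ?_
  intro im j _
  rw [List.foldl_map, List.foldl_filter]
  refine List.foldl_ext _ _ im ?_
  intro im2 i _
  split_ifs <;> simp_all [pvW]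

theorem pv_mem_iff (x y xr yr : Int) (hx : 1 ≤ xr) (hy : 1 ≤ yr) (z : Int × Int) :
    z ∈ pvLA x y xr yr ↔ z ∈ pvLB x y xr yr := by
  obtain ⟨r, c⟩ := z
  simp only [pvLA, pvLB, List.mem_append, List.mem_flatMap, List.mem_map, List.mem_filter,
    List.mem_cons, List.not_mem_nil, or_false, PySem.List.mem_pyRange_one, Prod.mk.injEq,
    decide_eq_true_eq]
  constructor
  · rintro (⟨i, hi, h | h⟩ | ⟨j, hj, h | h⟩) <;>
      exact ⟨r, by omega, c, ⟨by omega, by omega⟩, rfl, rfl⟩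
  · rintro ⟨j, hj, i, ⟨hi, hb⟩, h1, h2⟩
    rcases hb with h | h | h | h
    · exact Or.inr ⟨r, by omega, Or.inl ⟨rfl, by omega⟩⟩
    · exact Or.inr ⟨r, by omega, Or.inr ⟨rfl, by omega⟩⟩
    · exact Or.inl ⟨c, by omega, Or.inl ⟨by omega, rfl⟩⟩
    · exact Or.inl ⟨c, by omega, Or.inr ⟨by omega, rfl⟩⟩

-- ===== VERDICT (by name: the statement is the Claim_ definition above) =====
theorem draw_rect_spec : Claim_unchanged_draw_rect := by
  intro img color x y xr yr _ _ hnd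
  have hcases : (1 ≤ xr ∧ 1 ≤ yr) ∨ (xr ≤ 0 ∧ yr ≤ 0) := by
    unfold D_draw_rect at hnd; omega
  rcases hcases with ⟨hx, hy⟩ | ⟨hx, hy⟩
  · rw [draw_rect_eq_foldl, draw_rect_alt_eq_foldl]
    exact foldl_pvW_of_mem_iff color _ _ img (pv_mem_iff x y xr yr hx hy)
  · unfold draw_rect draw_rect_alt
    rw [PySem.List.pyRange_one_eq_nil (by omega : x + xr ≤ x),
        PySem.List.pyRange_one_eq_nil (by omega : y + yr ≤ y)]
    rfl

theorem draw_rect_changed : Claim_changed_draw_rect := by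
  unfold Claim_changed_draw_rect; decide
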